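-- pv_equiv track=rewrite | github.com/AdvaithD/Paradise | CTCI-Solutions/CH1-ArraysStrings/permutation.py | permutation
-- ===== SOURCE A (Python) =====
-- def permutation(a, b):
--     if len(a) != len(b):
--         return False
--     chars = {}
--     for x in a:
--         if x not in chars:
--             chars[x] = 1
--         else:
--             chars[x] += 1
--     for i in b:
--         if i in chars:
--             chars[i] -= 1
--             if chars[i] == 0:
--                 del chars[i]
--             elif chars[i] < 0:
--                 return False
--         else:
--             return False
--     if len(chars.values()) == 0:
--         return True
-- ===== SOURCE B (Python) =====
-- def permutation(a, b):
--     return sorted(a) == sorted(b)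
-- ===== Notes on version B (the rewrite author's own statement) =====
-- stated objective: simpler
-- what changed: Replaces the length check plus build-a-count-dict-then-consume-it logic with a single sort-and-compare: sorted(a) == sorted(b).
import Mathlib
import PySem

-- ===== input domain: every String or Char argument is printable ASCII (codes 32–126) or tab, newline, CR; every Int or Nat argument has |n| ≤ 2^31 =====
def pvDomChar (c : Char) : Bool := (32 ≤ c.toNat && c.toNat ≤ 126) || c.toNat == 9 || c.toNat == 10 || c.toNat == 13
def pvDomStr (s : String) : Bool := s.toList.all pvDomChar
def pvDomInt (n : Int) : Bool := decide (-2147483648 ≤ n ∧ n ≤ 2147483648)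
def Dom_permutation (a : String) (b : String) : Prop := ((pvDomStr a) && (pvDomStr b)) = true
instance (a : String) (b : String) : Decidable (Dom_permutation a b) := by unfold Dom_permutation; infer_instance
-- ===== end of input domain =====

-- B replaces A's count-dict build/consume logic with a single sort-and-compare (same return value; no speed claim).

-- ===== PORT A =====
-- first loop of A: build the character-count dict from `a`
def pvBuild : List Char → PySem.Dict Char Int → PySem.Dict Char Int
  | [], d => d
  | x :: xs, d =>
      pvBuild xs (if d.contains x = false then d.insert x 1 else d.modify x 0 (· + 1))

-- second loop of A: consume counts along `b`, then A's final `len(chars.values()) == 0` check.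
-- (On a nonempty leftover dict Python falls off the end returning None, not a bool; that point is
-- unreachable — when the lengths are equal and the loop finishes the dict is empty, as the proof
-- below shows — and is ported as `false`.)
def pvCheck : List Char → PySem.Dict Char Int → Bool
  | [], d => d.values.length == 0
  | i :: rest, d =>
      if d.contains i then
        let d' := d.modify i 0 (fun v => v - 1)
        if d'.getD i 0 == 0 then pvCheck rest (d'.erase i)
        else if d'.getD i 0 < 0 then false
        else pvCheck rest d'
      else false

def permutation (a : String) (b : String) : Bool :=
  if PySem.Str.len a ≠ PySem.Str.len b then false
  else pvCheck b.toList (pvBuild a.toList PySem.Dict.empty)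

-- ===== PORT B =====
def permutation_alt (a : String) (b : String) : Bool :=
  PySem.List.sorted a.toList (fun x => x) false == PySem.List.sorted b.toList (fun x => x) false

-- ===== PRECONDITION & SPEC =====
def Spec_permutation (a : String) (b : String) (out : Bool) : Prop := out = permutation_alt a b
instance (a : String) (b : String) (out : Bool) : Decidable (Spec_permutation a b out) := by unfold Spec_permutation; infer_instance

-- ===== CLAIM (what is proved, stated in full; the proofs are below) =====
def Claim_equal_permutation : Prop := ∀ (a : String) (b : String), Dom_permutation a b → Spec_permutation a b (permutation a b)

-- ===== LEMMAS AND PROOFS =====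

-- PySem.Dict has no erase/get? lemma in the prelude; erase is items.filter, so this is ours to prove.
theorem pvGet?_erase {κ ν : Type} [DecidableEq κ] (d : PySem.Dict κ ν) (k k' : κ) :
    (d.erase k).get? k' = if k' = k then none else d.get? k' := by
  obtain ⟨l⟩ := d
  induction l with
  | nil => simp [PySem.Dict.erase, PySem.Dict.get?]
  | cons p t ih =>
    by_cases h1 : p.1 = k <;> by_cases h2 : p.1 = k' <;>
      simp_all [PySem.Dict.erase, PySem.Dict.get?]

-- the invariant tying a dict to a multiplicity function
def pvOpt (n : Nat) : Option Int := if n = 0 then none else some ((n : Nat) : Int)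

theorem pvOpt_zero {n : Nat} (h : n = 0) : pvOpt n = none := by simp [pvOpt, h]

theorem pvOpt_pos {n : Nat} (h : n ≠ 0) : pvOpt n = some ((n : Nat) : Int) := by simp [pvOpt, h]

def pvInv (d : PySem.Dict Char Int) (m : Char → Nat) : Prop :=
  ∀ c, d.get? c = pvOpt (m c)

theorem pvBuild_inv (l : List Char) (d : PySem.Dict Char Int) (m : Char → Nat)
    (h : pvInv d m) : pvInv (pvBuild l d) (fun c => m c + l.count c) := by
  induction l generalizing d m with
  | nil => simpa [pvBuild] using h
  | cons x xs ih =>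
    by_cases hmx : m x = 0
    · have hcf : d.contains x = false := by
        rw [PySem.Dict.contains_eq_isSome_get?, h x, pvOpt_zero hmx]; rfl
      have step : pvInv (d.insert x 1) (fun c => if c = x then 1 else m c) := by
        intro c
        show (d.insert x 1).get? c = pvOpt (if c = x then 1 else m c)
        by_cases hcx : c = x
        · rw [hcx, PySem.Dict.get?_insert_self, if_pos rfl, pvOpt_pos (by omega)]
          norm_num
        · rw [PySem.Dict.get?_insert_of_ne _ _ hcx, h c, if_neg hcx]
      have key := ih _ _ step
      intro c
      have hk : (pvBuild xs (d.insert x 1)).get? c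
          = pvOpt ((if c = x then 1 else m c) + xs.count c) := key c
      have hcc : (x :: xs).count c = xs.count c + (if x = c then 1 else 0) := by
        simp [List.count_cons]
      have hbr : (if d.contains x = false then d.insert x 1 else d.modify x 0 (· + 1))
          = d.insert x 1 := by rw [hcf]; rfl
      have hn : (if c = x then 1 else m c) + xs.count c = m c + (x :: xs).count c := by
        by_cases hcx : c = x
        · have hmc : m c = 0 := by rw [hcx]; exact hmx
          rw [if_pos hcx, hcc, if_pos hcx.symm]; omega
        · have hxc : x ≠ c := fun h' => hcx h'.symm
          rw [if_neg hcx, hcc, if_neg hxc]; omega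
      show (pvBuild xs (if d.contains x = false then d.insert x 1 else d.modify x 0 (· + 1))).get? c
          = pvOpt (m c + (x :: xs).count c)
      rw [hbr, hk, hn]
    · have hct : d.contains x = true := by
        rw [PySem.Dict.contains_eq_isSome_get?, h x, pvOpt_pos hmx]; rfl
      have hgd : d.getD x 0 = ((m x : Nat) : Int) := by
        rw [PySem.Dict.getD_eq_get?_getD, h x, pvOpt_pos hmx]; rfl
      have hmod : d.modify x 0 (· + 1) = d.insert x (((m x : Nat) : Int) + 1) := by
        rw [PySem.Dict.modify, hgd]
      have step : pvInv (d.modify x 0 (· + 1)) (fun c => if c = x then m x + 1 else m c) := by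
        intro c
        show (d.modify x 0 (· + 1)).get? c = pvOpt (if c = x then m x + 1 else m c)
        by_cases hcx : c = x
        · rw [hcx, hmod, PySem.Dict.get?_insert_self, if_pos rfl, pvOpt_pos (by omega)]
          congr 1
        · rw [hmod, PySem.Dict.get?_insert_of_ne _ _ hcx, h c, if_neg hcx]
      have key := ih _ _ step
      intro c
      have hk : (pvBuild xs (d.modify x 0 (· + 1))).get? c
          = pvOpt ((if c = x then m x + 1 else m c) + xs.count c) := key c
      have hcc : (x :: xs).count c = xs.count c + (if x = c then 1 else 0) := by
        simp [List.count_cons]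
      have hbr : (if d.contains x = false then d.insert x 1 else d.modify x 0 (· + 1))
          = d.modify x 0 (· + 1) := by rw [hct]; rfl
      have hn : (if c = x then m x + 1 else m c) + xs.count c = m c + (x :: xs).count c := by
        by_cases hcx : c = x
        · have hmc : m c = m x := by rw [hcx]
          rw [if_pos hcx, hcc, if_pos hcx.symm]; omega
        · have hxc : x ≠ c := fun h' => hcx h'.symm
          rw [if_neg hcx, hcc, if_neg hxc]; omega
      show (pvBuild xs (if d.contains x = false then d.insert x 1 else d.modify x 0 (· + 1))).get? c
          = pvOpt (m c + (x :: xs).count c)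
      rw [hbr, hk, hn]

theorem pvCheck_iff (l : List Char) (d : PySem.Dict Char Int) (m : Char → Nat)
    (h : pvInv d m) : (pvCheck l d = true ↔ ∀ c, l.count c = m c) := by
  induction l generalizing d m with
  | nil =>
    obtain ⟨items⟩ := d
    cases items with
    | nil =>
      simp only [pvCheck, PySem.Dict.values, List.map_nil, List.length_nil]
      constructor
      · intro _ c
        have hc := h c
        simp only [PySem.Dict.get?, List.find?_nil, Option.map_none, pvOpt] at hc
        rw [List.count_nil]
        split at hc
        · omega
        · exact absurd hc.symm (by simp)
      · intro _; rfl
    | cons p t =>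
      simp only [pvCheck, PySem.Dict.values, List.map_cons, List.length_cons]
      constructor
      · intro hlen; exact absurd hlen (by simp)
      · intro hall
        exfalso
        have h1 := h p.1
        have h2 := hall p.1
        rw [List.count_nil] at h2
        rw [PySem.Dict.get?_mk_cons] at h1
        simp [pvOpt, ← h2] at h1
  | cons i rest ih =>
    by_cases hmi : m i = 0
    · have hcf : d.contains i = false := by
        rw [PySem.Dict.contains_eq_isSome_get?, h i, pvOpt_zero hmi]; rfl
      show (if d.contains i = true then _ else false) = true ↔ _
      rw [hcf, if_neg (by simp)]
      simp only [Bool.false_eq_true, false_iff]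
      intro hall
      have hx := hall i
      have hcc : (i :: rest).count i = rest.count i + 1 := by simp
      omega
    · have hct : d.contains i = true := by
        rw [PySem.Dict.contains_eq_isSome_get?, h i, pvOpt_pos hmi]; rfl
      have hgd : d.getD i 0 = ((m i : Nat) : Int) := by
        rw [PySem.Dict.getD_eq_get?_getD, h i, pvOpt_pos hmi]; rfl
      have hmod : d.modify i 0 (fun v => v - 1) = d.insert i (((m i : Nat) : Int) - 1) := by
        rw [PySem.Dict.modify, hgd]
      have hgd' : (d.modify i 0 (fun v => v - 1)).getD i 0 = ((m i : Nat) : Int) - 1 := by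
        rw [hmod, PySem.Dict.getD_eq_get?_getD, PySem.Dict.get?_insert_self]; rfl
      simp only [pvCheck, hct, hgd']
      rw [if_pos trivial]
      by_cases hm1 : m i = 1
      · have hz : ((((m i : Nat) : Int) - 1) == 0) = true := by simp [hm1]
        rw [hz, if_pos rfl]
        have hinv : pvInv ((d.modify i 0 (fun v => v - 1)).erase i)
            (fun c => if c = i then 0 else m c) := by
          intro c
          show ((d.modify i 0 (fun v => v - 1)).erase i).get? c
              = pvOpt (if c = i then 0 else m c)
          rw [pvGet?_erase]
          by_cases hci : c = i
          · rw [if_pos hci, if_pos hci, pvOpt_zero rfl]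
          · rw [if_neg hci, if_neg hci, hmod, PySem.Dict.get?_insert_of_ne _ _ hci, h c]
        rw [ih _ _ hinv]
        constructor
        · intro hall c
          have hx := hall c
          have hcc : (i :: rest).count c = rest.count c + (if i = c then 1 else 0) := by
            simp [List.count_cons]
          by_cases hci : c = i
          · have hmc : m c = 1 := by rw [hci]; exact hm1
            rw [if_pos hci] at hx
            rw [hcc, if_pos hci.symm]; omega
          · have hic : i ≠ c := fun h' => hci h'.symm
            rw [if_neg hci] at hx
            rw [hcc, if_neg hic]; omega
        · intro hall c
          have hx := hall c
          have hcc : (i :: rest).count c = rest.count c + (if i = c then 1 else 0) := by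
            simp [List.count_cons]
          by_cases hci : c = i
          · have hmc : m c = 1 := by rw [hci]; exact hm1
            rw [hcc, if_pos hci.symm] at hx
            rw [if_pos hci]; omega
          · have hic : i ≠ c := fun h' => hci h'.symm
            rw [hcc, if_neg hic] at hx
            rw [if_neg hci]; omega
      · have hge2 : 2 ≤ m i := by omega
        have hz : ((((m i : Nat) : Int) - 1) == 0) = false := by
          simp only [beq_eq_false_iff_ne, ne_eq]
          intro hcontra; omega
        have hneg : ¬ ((((m i : Nat) : Int) - 1) < 0) := by omega
        rw [hz, if_neg (by simp), if_neg hneg]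
        have hinv : pvInv (d.modify i 0 (fun v => v - 1))
            (fun c => if c = i then m i - 1 else m c) := by
          intro c
          show (d.modify i 0 (fun v => v - 1)).get? c = pvOpt (if c = i then m i - 1 else m c)
          by_cases hci : c = i
          · rw [hci, if_pos rfl, hmod, PySem.Dict.get?_insert_self, pvOpt_pos (by omega)]
            congr 1
            omega
          · rw [if_neg hci, hmod, PySem.Dict.get?_insert_of_ne _ _ hci, h c]
        rw [ih _ _ hinv]
        constructor
        · intro hall c
          have hx := hall c
          have hcc : (i :: rest).count c = rest.count c + (if i = c then 1 else 0) := by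
            simp [List.count_cons]
          by_cases hci : c = i
          · have hmc : m c = m i := by rw [hci]
            rw [if_pos hci] at hx
            rw [hcc, if_pos hci.symm]; omega
          · have hic : i ≠ c := fun h' => hci h'.symm
            rw [if_neg hci] at hx
            rw [hcc, if_neg hic]; omega
        · intro hall c
          have hx := hall c
          have hcc : (i :: rest).count c = rest.count c + (if i = c then 1 else 0) := by
            simp [List.count_cons]
          by_cases hci : c = i
          · have hmc : m c = m i := by rw [hci]
            rw [hcc, if_pos hci.symm] at hx
            rw [if_pos hci]; omega
          · have hic : i ≠ c := fun h' => hci h'.symm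
            rw [hcc, if_neg hic] at hx
            rw [if_neg hci]; omega

theorem permutation_true_iff (a b : String) :
    permutation a b = true ↔ b.toList.Perm a.toList := by
  unfold permutation
  by_cases hlen : PySem.Str.len a ≠ PySem.Str.len b
  · rw [if_pos hlen]
    simp only [Bool.false_eq_true, false_iff]
    intro hperm
    apply hlen
    simp only [PySem.Str.len_eq]
    have := hperm.length_eq
    omega
  · rw [if_neg hlen]
    have hbase : pvInv (pvBuild a.toList PySem.Dict.empty) (fun c => a.toList.count c) := by
      have h0 : pvInv PySem.Dict.empty (fun _ => 0) := by
        intro c; rw [PySem.Dict.get?_empty, pvOpt_zero rfl]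
      simpa using pvBuild_inv a.toList PySem.Dict.empty (fun _ => 0) h0
    rw [pvCheck_iff b.toList _ _ hbase]
    exact (List.perm_iff_count).symm

theorem permutation_alt_true_iff (a b : String) :
    permutation_alt a b = true ↔ a.toList.Perm b.toList := by
  unfold permutation_alt
  rw [beq_iff_eq, PySem.List.sorted_id_eq_sorted_id_iff_perm]

-- ===== VERDICT (by name: the statement is the Claim_ definition above) =====
theorem permutation_spec : Claim_equal_permutation := by
  intro a b _
  unfold Spec_permutation
  rw [Bool.eq_iff_iff, permutation_true_iff, permutation_alt_true_iff]
  exact ⟨List.Perm.symm, List.Perm.symm⟩
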